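-- pv_equiv track=rewrite | github.com/stajahlee/job-search-web-scraper | src/job_scrape.py | make_postings_list
-- ===== SOURCE A (Python) =====
-- def make_postings_list(page_str):
-- 	index = 0
-- 	posts_indices = []
-- 	posts = []
-- 	while index < len(page_str):
-- 		index = page_str.find('data-posting-title=', index)
-- 		if index == -1:
-- 			break
-- 		posts_indices.append(index)
-- 		index += 19
-- 	for i in posts_indices:
-- 		posts.append(page_str[i+20:i+100])
-- 	count = 0
-- 	while count < len(posts):
-- 		posts[count] = posts[count][:posts[count].find('"')]
-- 		count += 1
-- 	return posts
-- ===== SOURCE B (Python) =====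
-- def make_postings_list(page_str):
-- 	marker = 'data-posting-title='
-- 	posts = []
-- 	s = page_str
-- 	while s:
-- 		if s.startswith(marker):
-- 			w = s[20:100]
-- 			posts.append(w[:w.find('"')])
-- 			s = s[19:]
-- 		else:
-- 			s = s[1:]
-- 	return posts
-- ===== Notes on version B (the rewrite author's own statement) =====
-- stated objective: simpler
-- what changed: Replaces A's three passes (a find-based index scan collecting posts_indices, a slicing pass, and an in-place truncation loop) by a single pass over shrinking suffixes of the string using startswith, with no index bookkeeping or intermediate lists.
import Mathlib
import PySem

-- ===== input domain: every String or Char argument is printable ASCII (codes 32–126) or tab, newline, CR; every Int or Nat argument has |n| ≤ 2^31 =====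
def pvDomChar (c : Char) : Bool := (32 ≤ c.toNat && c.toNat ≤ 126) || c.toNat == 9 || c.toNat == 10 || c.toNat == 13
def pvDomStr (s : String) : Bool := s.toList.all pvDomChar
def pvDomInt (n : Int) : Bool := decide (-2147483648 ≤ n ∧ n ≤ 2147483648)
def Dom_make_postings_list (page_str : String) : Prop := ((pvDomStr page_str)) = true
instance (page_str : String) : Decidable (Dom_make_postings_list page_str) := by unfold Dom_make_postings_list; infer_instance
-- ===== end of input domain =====

-- B replaces A's three passes (find-based index collection, a slicing pass, an in-place
-- truncation loop) by a single pass over shrinking suffixes using startswith: simpler.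

-- ===== PORT A =====
def pvMarker : List Char := "data-posting-title=".toList

-- termination helper for A's while loop (cited in decreasing_by)
theorem pvFindFrom_nonneg (s sub : List Char) (a : Int)
    (h : PySem.Chars.findFrom s sub a ≠ -1) :
    0 ≤ PySem.Chars.findFrom s sub a ∧ a ≤ PySem.Chars.findFrom s sub a := by
  unfold PySem.Chars.findFrom at *
  dsimp only at h ⊢
  split_ifs at h ⊢ <;>
    first
    | omega
    | (have h2 := PySem.Chars.neg_one_le_find (List.drop (Int.toNat 0) (List.take ((s.length:Int)).toNat s)) sub; omega)
    | (have h2 := PySem.Chars.neg_one_le_find (List.drop (a + (s.length:Int)).toNat (List.take ((s.length:Int)).toNat s)) sub; omega)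
    | (have h2 := PySem.Chars.neg_one_le_find (List.drop a.toNat (List.take ((s.length:Int)).toNat s)) sub; omega)

-- while index < len(page_str): index = page_str.find(marker, index); …; index += 19
def pvFindLoop (s : List Char) (index : Int) (acc : List Int) : List Int :=
  if _h : index < (s.length : Int) then
    if hj : PySem.Chars.findFrom s pvMarker index = -1 then acc
    else pvFindLoop s (PySem.Chars.findFrom s pvMarker index + 19)
           (acc ++ [PySem.Chars.findFrom s pvMarker index])
  else acc
termination_by ((s.length : Int) + 1 - index).toNat
decreasing_by
  have := pvFindFrom_nonneg s pvMarker index hj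
  omega

-- while count < len(posts): posts[count] = posts[count][:posts[count].find('"')]
def pvTruncLoop (posts : List (List Char)) (count : Nat) : List (List Char) :=
  if _h : count < posts.length then
    pvTruncLoop
      (posts.set count
        (PySem.Chars.slice (posts.getD count [])
          none (some (PySem.Chars.find (posts.getD count []) ['"']))))
      (count + 1)
  else posts
termination_by posts.length - count
decreasing_by simp_all; omega

def make_postings_list (page_str : String) : List String :=
  let s := page_str.toList
  let posts_indices := pvFindLoop s 0 []
  let posts := posts_indices.foldl
    (fun acc i => acc ++ [PySem.Chars.slice s (some (i + 20)) (some (i + 100))]) []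
  (pvTruncLoop posts 0).map String.ofList

-- ===== PORT B =====
-- w = s[20:100]; w[:w.find('"')]
def pvPost (s : List Char) : List Char :=
  PySem.Chars.slice (PySem.Chars.slice s (some 20) (some 100))
    none (some (PySem.Chars.find (PySem.Chars.slice s (some 20) (some 100)) ['"']))

-- while s: if s.startswith(marker): append the post; s = s[19:] else: s = s[1:]
def pvScanB : List Char → List (List Char)
  | [] => []
  | c :: rest =>
    if PySem.Chars.startswith (c :: rest) pvMarker then
      pvPost (c :: rest) :: pvScanB ((c :: rest).drop 19)
    else pvScanB ((c :: rest).drop 1)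
termination_by s => s.length
decreasing_by all_goals simp

def make_postings_list_alt (page_str : String) : List String :=
  (pvScanB page_str.toList).map String.ofList

-- ===== PRECONDITION & SPEC =====
def Spec_make_postings_list (page_str : String) (out : List String) : Prop := out = make_postings_list_alt page_str
instance (page_str : String) (out : List String) : Decidable (Spec_make_postings_list page_str out) := by unfold Spec_make_postings_list; infer_instance

-- ===== CLAIM (what is proved, stated in full; the proofs are below) =====
def Claim_equal_make_postings_list : Prop := ∀ (page_str : String), Dom_make_postings_list page_str → Spec_make_postings_list page_str (make_postings_list page_str)

-- ===== LEMMAS AND PROOFS =====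

-- A's absolute-index post: truncate(s[i+20:i+100])
def pvPostAbs (s : List Char) (i : Int) : List Char :=
  PySem.Chars.slice (PySem.Chars.slice s (some (i + 20)) (some (i + 100)))
    none (some (PySem.Chars.find (PySem.Chars.slice s (some (i + 20)) (some (i + 100))) ['"']))

theorem pvSliceWin (s : List Char) (n : Nat) :
    PySem.Chars.slice s (some ((n:Int) + 20)) (some ((n:Int) + 100)) =
    PySem.Chars.slice (s.drop n) (some 20) (some 100) := by
  have h1 : ((n:Int) + 20) = ((n + 20 : Nat) : Int) := by push_cast; ring
  have h2 : ((n:Int) + 100) = ((n + 100 : Nat) : Int) := by push_cast; ring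
  have h3 : (20:Int) = ((20:Nat):Int) := by norm_num
  have h4 : (100:Int) = ((100:Nat):Int) := by norm_num
  simp only [PySem.Chars.slice_eq_listSlice]
  rw [h1, h2, h3, h4, PySem.List.slice_natCast, PySem.List.slice_natCast, List.drop_drop]
  congr 1
  omega

theorem pvPostAbs_eq_post (s : List Char) (n : Nat) :
    pvPostAbs s (n : Int) = pvPost (s.drop n) := by
  unfold pvPostAbs pvPost
  rw [pvSliceWin]

theorem pvScanB_nil_of_not_infix (l : List Char) (h : ¬ pvMarker <:+: l) : pvScanB l = [] := by
  induction l with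
  | nil => rw [pvScanB]
  | cons c rest ih =>
    rw [pvScanB]
    have hs : PySem.Chars.startswith (c :: rest) pvMarker = false := by
      rw [Bool.eq_false_iff]
      intro hb
      exact h ((PySem.Chars.startswith_iff _ _).mp hb).isInfix
    rw [hs]
    simp only [Bool.false_eq_true, if_false, List.drop_succ_cons, List.drop_zero]
    exact ih (fun hi => h (List.infix_cons hi))

theorem pvScanB_skip (m : Nat) (l : List Char)
    (h : ∀ i < m, ¬ pvMarker <+: l.drop i) : pvScanB l = pvScanB (l.drop m) := by
  induction m generalizing l with
  | zero => simp
  | succ m ih =>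
    cases l with
    | nil => simp [pvScanB]
    | cons c rest =>
      rw [pvScanB]
      have hs : PySem.Chars.startswith (c :: rest) pvMarker = false := by
        rw [Bool.eq_false_iff]
        intro hb
        exact h 0 (by omega) ((PySem.Chars.startswith_iff _ _).mp hb)
      rw [hs]
      simp only [Bool.false_eq_true, if_false, List.drop_succ_cons, List.drop_zero]
      exact ih rest (fun i hi => by simpa using h (i+1) (by omega))

theorem pvTruncLoop_eq (posts : List (List Char)) (count : Nat) :
    pvTruncLoop posts count =
      posts.take count ++ (posts.drop count).map
        (fun p => PySem.Chars.slice p none (some (PySem.Chars.find p ['"']))) := by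
  rw [pvTruncLoop]
  split
  · next h =>
    rw [pvTruncLoop_eq]
    have hget : posts.getD count [] = posts[count] := List.getD_eq_getElem posts [] h
    rw [hget, List.set_eq_take_append_cons_drop, if_pos h]
    rw [List.drop_eq_getElem_cons h]
    have hL : (List.take count posts).length = count := List.length_take_of_le h.le
    rw [List.take_append, List.drop_append, hL]
    have h1 : count + 1 - count = 1 := by omega
    rw [h1]
    have t1 : List.take (count+1) (List.take count posts) = List.take count posts := by
      rw [List.take_take]; congr 1; omega
    have t3 : List.drop (count+1) (List.take count posts) = [] :=
      List.drop_eq_nil_of_le (by rw [hL]; omega)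
    rw [t1, t3]
    simp only [List.take_succ_cons, List.take_zero, List.drop_succ_cons, List.drop_zero,
      List.nil_append, List.map_cons]
    simp
  · next h =>
    rw [List.take_of_length_le (by omega), List.drop_eq_nil_of_le (by omega)]
    simp
termination_by posts.length - count
decreasing_by simp; omega

theorem pvFindLoop_key (s : List Char) (k : Nat) (acc : List Int) :
    (pvFindLoop s (k : Int) acc).map (pvPostAbs s) =
      acc.map (pvPostAbs s) ++ pvScanB (s.drop k) := by
  rw [pvFindLoop]
  split
  · next hlt =>
    have hk : k ≤ s.length := by exact_mod_cast le_of_lt hlt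
    have hF := PySem.Chars.findFrom_natCast s pvMarker k hk
    by_cases hneg : PySem.Chars.find (s.drop k) pvMarker = -1
    · rw [dif_pos (by rw [hF, if_pos hneg])]
      have hni : ¬ pvMarker <:+: s.drop k := (PySem.Chars.find_eq_neg_one_iff _ _).mp hneg
      rw [pvScanB_nil_of_not_infix _ hni, List.append_nil]
    · have hfnn : 0 ≤ PySem.Chars.find (s.drop k) pvMarker := by
        have := PySem.Chars.neg_one_le_find (s.drop k) pvMarker
        omega
      have hspec := PySem.Chars.find_spec (s := s.drop k) (sub := pvMarker) hfnn
      have hFval : PySem.Chars.findFrom s pvMarker (k:Int) =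
          ((k + (PySem.Chars.find (s.drop k) pvMarker).toNat : Nat) : Int) := by
        rw [hF, if_neg hneg]; push_cast; omega
      have hne : PySem.Chars.findFrom s pvMarker (k:Int) ≠ -1 := by rw [hFval]; omega
      rw [dif_neg hne, hFval]
      have hcast : ((k + (PySem.Chars.find (s.drop k) pvMarker).toNat : Nat) : Int) + 19 =
          ((k + (PySem.Chars.find (s.drop k) pvMarker).toNat + 19 : Nat) : Int) := by
        push_cast; ring
      rw [hcast, pvFindLoop_key s (k + (PySem.Chars.find (s.drop k) pvMarker).toNat + 19)]
      set m := (PySem.Chars.find (s.drop k) pvMarker).toNat with hm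
      have hskip : pvScanB (s.drop k) = pvScanB ((s.drop k).drop m) :=
        pvScanB_skip m (s.drop k) (fun i hi => hspec.2 i hi)
      have hdd : (s.drop k).drop m = s.drop (k + m) := by rw [List.drop_drop]
      have hpre : pvMarker <+: s.drop (k + m) := by rw [← hdd]; exact hspec.1
      obtain ⟨c, rest, heq⟩ : ∃ c rest, s.drop (k + m) = c :: rest := by
        cases hcs : s.drop (k + m) with
        | nil => rw [hcs] at hpre; simp [pvMarker] at hpre
        | cons c rest => exact ⟨c, rest, rfl⟩
      have hsw : PySem.Chars.startswith (c :: rest) pvMarker = true := by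
        rw [PySem.Chars.startswith_iff]; rw [← heq]; exact hpre
      have hscan : pvScanB (s.drop (k + m)) =
          pvPost (s.drop (k + m)) :: pvScanB (s.drop (k + m + 19)) := by
        rw [heq, pvScanB, hsw, if_pos rfl, ← heq]
        have hd19 : (s.drop (k + m)).drop 19 = s.drop (k + m + 19) := by
          rw [List.drop_drop]
        rw [hd19]
      rw [hskip, hdd, hscan, List.map_append]
      simp only [List.map_cons, List.map_nil]
      rw [pvPostAbs_eq_post s (k + m)]
      simp
  · next hge =>
    have hnil : s.drop k = [] := List.drop_eq_nil_of_le (by exact_mod_cast not_lt.mp hge)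
    simp [hnil, pvScanB]
termination_by s.length - k
decreasing_by omega

-- ===== VERDICT (by name: the statement is the Claim_ definition above) =====
theorem make_postings_list_spec : Claim_equal_make_postings_list := by
  intro page_str _
  unfold Spec_make_postings_list make_postings_list make_postings_list_alt
  dsimp only
  rw [PySem.List.foldl_append_singleton_eq_map
    (fun i => PySem.Chars.slice page_str.toList (some (i + 20)) (some (i + 100)))
    (pvFindLoop page_str.toList 0 []) []]
  rw [List.nil_append]
  rw [pvTruncLoop_eq, List.take_zero, List.drop_zero, List.nil_append]
  suffices hs2 : List.map (fun p => PySem.Chars.slice p none (some (PySem.Chars.find p ['"'])))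
      (List.map (fun i => PySem.Chars.slice page_str.toList (some (i + 20)) (some (i + 100)))
        (pvFindLoop page_str.toList 0 [])) = pvScanB page_str.toList by
    rw [hs2]
  rw [List.map_map]
  have hkey := pvFindLoop_key page_str.toList 0 []
  simpa [pvPostAbs, Function.comp] using hkey
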